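-- pv_equiv track=rewrite | github.com/noalevitzky/Intro2CS | wave_editor.py | wav_list_merge_for_equal_frame_rates
-- ===== SOURCE A (Python) =====
-- def calc_avg_samples(sample1, sample2, sample3=False):
--     """
--     calculate the avg of given values.
--     could except up to 3 values.
--     """
--     i1, j1 = sample1
--     i2, j2 = sample2
--     if sample3:     # sample3 exists
--         i3, j3 = sample3
--         avg_sample = [int((i1 + i2 + i3)/3), int((j1 + j2 + j3)/3)]
--     else:   # only 2 samples where given
--         avg_sample = [int((i1 + i2)/2), int((j1 + j2)/2)]
--     return avg_sample
--
-- def wav_list_merge_for_equal_frame_rates(wav_lst1, wav_lst2):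
--     """
--     this function get two unequal length wave lists, and merges them to
--     one new wav_list, by averaging them. once the bigger list ends,
--     it just adds the leftover frames from the bigger list
--     :return: new merged wav list
--     """
--     new_wav_lst = []
--     for index_length in range(max(len(wav_lst1), len(wav_lst2))):
--         try:
--             new_wav_lst.append(calc_avg_samples(wav_lst1[index_length], wav_lst2[index_length]))
--         except IndexError:
--             try:
--                 new_wav_lst.append(wav_lst1[index_length])
--             except IndexError:
--                 try:
--                     new_wav_lst.append(wav_lst2[index_length])
--                 except IndexError:
--                     return new_wav_lst
--     return new_wav_lst
-- ===== SOURCE B (Python) =====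
-- def wav_list_merge_for_equal_frame_rates(wav_lst1, wav_lst2):
--     result = [[int((i1 + i2) / 2), int((j1 + j2) / 2)]
--               for (i1, j1), (i2, j2) in zip(wav_lst1, wav_lst2)]
--     min_len = min(len(wav_lst1), len(wav_lst2))
--     longer = wav_lst1 if len(wav_lst1) > len(wav_lst2) else wav_lst2
--     result.extend(longer[min_len:])
--     return result
-- ===== Notes on version B (the rewrite author's own statement) =====
-- stated objective: simpler
-- what changed: Replaces A's single exception-driven loop over range(max(len1,len2)) with nested try/except IndexError fallbacks by a two-phase merge: a zip comprehension averaging the overlapping prefix, then one extend of the longer list's raw tail slice.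
import Mathlib
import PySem

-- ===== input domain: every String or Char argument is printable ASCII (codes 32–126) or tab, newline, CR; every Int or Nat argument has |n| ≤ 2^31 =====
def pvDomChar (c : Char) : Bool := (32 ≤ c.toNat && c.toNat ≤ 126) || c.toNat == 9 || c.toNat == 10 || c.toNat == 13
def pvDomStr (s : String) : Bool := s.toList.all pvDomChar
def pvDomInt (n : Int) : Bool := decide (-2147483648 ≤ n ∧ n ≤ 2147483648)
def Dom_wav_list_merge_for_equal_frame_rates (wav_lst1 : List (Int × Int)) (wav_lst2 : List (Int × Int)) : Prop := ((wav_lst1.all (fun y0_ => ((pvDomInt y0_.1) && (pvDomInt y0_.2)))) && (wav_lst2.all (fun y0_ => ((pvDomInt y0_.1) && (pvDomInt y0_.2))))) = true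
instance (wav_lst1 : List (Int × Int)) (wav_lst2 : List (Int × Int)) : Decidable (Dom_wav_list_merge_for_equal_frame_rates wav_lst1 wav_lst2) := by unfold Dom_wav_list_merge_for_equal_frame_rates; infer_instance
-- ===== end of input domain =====

-- B replaces A's exception-driven index loop by a two-phase zip-then-extend merge (objective: simpler).

-- ===== PORT A =====
-- int((i1+i2)/2) in Python: exact float division (|i1+i2| ≤ 2^32 < 2^53 on Dom) then
-- truncation toward zero = Int.tdiv.
def calc_avg_samples (sample1 : Int × Int) (sample2 : Int × Int) : List Int :=
  [Int.tdiv (sample1.1 + sample2.1) 2, Int.tdiv (sample1.2 + sample2.2) 2]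

-- the body of A's for-loop: try avg / except append lst1[i] / except append lst2[i] / except return
def mergeStep (wav_lst1 wav_lst2 : List (Int × Int)) (acc : List (List Int)) (i : Int) :
    List (List Int) :=
  match PySem.List.pyGet? wav_lst1 i, PySem.List.pyGet? wav_lst2 i with
  | some s1, some s2 => acc ++ [calc_avg_samples s1 s2]
  | some s1, none    => acc ++ [[s1.1, s1.2]]
  | none,    some s2 => acc ++ [[s2.1, s2.2]]
  | none,    none    => acc   -- Python's 'return new_wav_lst' (unreachable for i in range(max))

def wav_list_merge_for_equal_frame_rates (wav_lst1 : List (Int × Int)) (wav_lst2 : List (Int × Int)) : List (List Int) :=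
  (PySem.List.pyRange 0 (max wav_lst1.length wav_lst2.length : Nat) 1).foldl
    (mergeStep wav_lst1 wav_lst2) []

-- ===== PORT B =====
def wav_list_merge_for_equal_frame_rates_alt (wav_lst1 : List (Int × Int)) (wav_lst2 : List (Int × Int)) : List (List Int) :=
  let result := (wav_lst1.zip wav_lst2).map
    (fun p => [Int.tdiv (p.1.1 + p.2.1) 2, Int.tdiv (p.1.2 + p.2.2) 2])
  let min_len := min wav_lst1.length wav_lst2.length
  let longer := if wav_lst1.length > wav_lst2.length then wav_lst1 else wav_lst2
  result ++ (PySem.List.slice longer (some (min_len : Int)) none).map (fun s => [s.1, s.2])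

-- ===== PRECONDITION & SPEC =====
def Spec_wav_list_merge_for_equal_frame_rates (wav_lst1 : List (Int × Int)) (wav_lst2 : List (Int × Int)) (out : List (List Int)) : Prop := out = wav_list_merge_for_equal_frame_rates_alt wav_lst1 wav_lst2
instance (wav_lst1 : List (Int × Int)) (wav_lst2 : List (Int × Int)) (out : List (List Int)) : Decidable (Spec_wav_list_merge_for_equal_frame_rates wav_lst1 wav_lst2 out) := by unfold Spec_wav_list_merge_for_equal_frame_rates; infer_instance

-- ===== CLAIM (what is proved, stated in full; the proofs are below) =====
def Claim_equal_wav_list_merge_for_equal_frame_rates : Prop := ∀ (wav_lst1 : List (Int × Int)) (wav_lst2 : List (Int × Int)), Dom_wav_list_merge_for_equal_frame_rates wav_lst1 wav_lst2 → Spec_wav_list_merge_for_equal_frame_rates wav_lst1 wav_lst2 (wav_list_merge_for_equal_frame_rates wav_lst1 wav_lst2)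

-- ===== LEMMAS AND PROOFS =====

-- A's loop body re-indexed by a Nat (what mergeStep does at index ↑k)
def mergeStepN (wav_lst1 wav_lst2 : List (Int × Int)) (acc : List (List Int)) (k : Nat) :
    List (List Int) :=
  match wav_lst1[k]?, wav_lst2[k]? with
  | some s1, some s2 => acc ++ [calc_avg_samples s1 s2]
  | some s1, none    => acc ++ [[s1.1, s1.2]]
  | none,    some s2 => acc ++ [[s2.1, s2.2]]
  | none,    none    => acc

lemma mergeStep_natCast (l1 l2 : List (Int × Int)) (acc : List (List Int)) (k : Nat) :
    mergeStep l1 l2 acc ((k : Nat) : Int) = mergeStepN l1 l2 acc k := by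
  simp [mergeStep, mergeStepN, PySem.List.pyGet?_natCast]

lemma foldl_pyRange_eq_foldl_range (l1 l2 : List (Int × Int)) (acc : List (List Int)) (N : Nat) :
    (PySem.List.pyRange 0 (N : Int) 1).foldl (mergeStep l1 l2) acc
      = (List.range N).foldl (mergeStepN l1 l2) acc := by
  rw [PySem.List.pyRange_one, List.foldl_map]
  simp only [Int.sub_zero, Int.toNat_natCast, Int.zero_add]
  exact PySem.List.foldl_congr_mem _ _ _ _ (fun acc k _ => mergeStep_natCast l1 l2 acc k)

lemma mergeStepN_cons_succ (a b : Int × Int) (t1 t2 : List (Int × Int))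
    (acc : List (List Int)) (k : Nat) :
    mergeStepN (a :: t1) (b :: t2) acc (k + 1) = mergeStepN t1 t2 acc k := by
  simp [mergeStepN]

lemma alt_nil_left (l2 : List (Int × Int)) :
    wav_list_merge_for_equal_frame_rates_alt [] l2 = l2.map (fun s => [s.1, s.2]) := by
  simp [wav_list_merge_for_equal_frame_rates_alt]

lemma alt_nil_right (l1 : List (Int × Int)) :
    wav_list_merge_for_equal_frame_rates_alt l1 [] = l1.map (fun s => [s.1, s.2]) := by
  cases l1 with
  | nil => simp [wav_list_merge_for_equal_frame_rates_alt]
  | cons a t =>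
    simp [wav_list_merge_for_equal_frame_rates_alt]

lemma alt_cons_cons (a b : Int × Int) (t1 t2 : List (Int × Int)) :
    wav_list_merge_for_equal_frame_rates_alt (a :: t1) (b :: t2)
      = calc_avg_samples a b :: wav_list_merge_for_equal_frame_rates_alt t1 t2 := by
  have hmin : min (t1.length + 1) (t2.length + 1) = min t1.length t2.length + 1 := by omega
  by_cases h : t1.length > t2.length
  · simp only [wav_list_merge_for_equal_frame_rates_alt, calc_avg_samples,
      List.zip_cons_cons, List.map_cons, List.length_cons, h, if_pos, Nat.min_def,
      List.cons_append]
    congr 1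
    simp only [← Nat.min_def]
    congr 1
    rw [if_pos (show t1.length + 1 > t2.length + 1 by omega), hmin,
      PySem.List.slice_from_natCast, PySem.List.slice_from_natCast, List.drop_succ_cons]
  · simp only [wav_list_merge_for_equal_frame_rates_alt, calc_avg_samples,
      List.zip_cons_cons, List.map_cons, List.length_cons, h, Nat.min_def,
      List.cons_append]
    congr 1
    simp only [← Nat.min_def]
    congr 1
    rw [if_neg (show ¬ t1.length + 1 > t2.length + 1 by omega), hmin,
      PySem.List.slice_from_natCast, PySem.List.slice_from_natCast, List.drop_succ_cons]
    simp

lemma foldl_nil_left (l2 : List (Int × Int)) (acc : List (List Int)) :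
    (List.range l2.length).foldl (mergeStepN [] l2) acc
      = acc ++ l2.map (fun s => [s.1, s.2]) := by
  induction l2 generalizing acc with
  | nil => simp
  | cons b t ih =>
    simp only [List.length_cons, List.range_succ_eq_map, List.foldl_cons, List.foldl_map]
    have h0 : mergeStepN [] (b :: t) acc 0 = acc ++ [[b.1, b.2]] := by simp [mergeStepN]
    have hstep : ∀ (acc' : List (List Int)) (k : Nat),
        mergeStepN [] (b :: t) acc' (k + 1) = mergeStepN [] t acc' k := by
      intro acc' k; simp [mergeStepN]
    have hc := PySem.List.foldl_congr_mem (List.range t.length)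
      (fun (x : List (List Int)) (y : Nat) => mergeStepN [] (b :: t) x y.succ)
      (mergeStepN [] t) (acc ++ [[b.1, b.2]]) (fun acc' k _ => hstep acc' k)
    rw [h0, hc, ih]
    simp

lemma foldl_nil_right (l1 : List (Int × Int)) (acc : List (List Int)) :
    (List.range l1.length).foldl (mergeStepN l1 []) acc
      = acc ++ l1.map (fun s => [s.1, s.2]) := by
  induction l1 generalizing acc with
  | nil => simp
  | cons a t ih =>
    simp only [List.length_cons, List.range_succ_eq_map, List.foldl_cons, List.foldl_map]
    have h0 : mergeStepN (a :: t) [] acc 0 = acc ++ [[a.1, a.2]] := by simp [mergeStepN]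
    have hstep : ∀ (acc' : List (List Int)) (k : Nat),
        mergeStepN (a :: t) [] acc' (k + 1) = mergeStepN t [] acc' k := by
      intro acc' k; simp [mergeStepN]
    have hc := PySem.List.foldl_congr_mem (List.range t.length)
      (fun (x : List (List Int)) (y : Nat) => mergeStepN (a :: t) [] x y.succ)
      (mergeStepN t []) (acc ++ [[a.1, a.2]]) (fun acc' k _ => hstep acc' k)
    rw [h0, hc, ih]
    simp

lemma foldl_main (l1 l2 : List (Int × Int)) (acc : List (List Int)) :
    (List.range (max l1.length l2.length)).foldl (mergeStepN l1 l2) acc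
      = acc ++ wav_list_merge_for_equal_frame_rates_alt l1 l2 := by
  induction l1 generalizing l2 acc with
  | nil => simpa [alt_nil_left] using foldl_nil_left l2 acc
  | cons a t1 ih =>
    cases l2 with
    | nil => simpa [alt_nil_right] using foldl_nil_right (a :: t1) acc
    | cons b t2 =>
      have hmax : max (a :: t1).length (b :: t2).length = max t1.length t2.length + 1 := by
        simp only [List.length_cons]; omega
      rw [hmax, List.range_succ_eq_map, List.foldl_cons, List.foldl_map]
      have h0 : mergeStepN (a :: t1) (b :: t2) acc 0 = acc ++ [calc_avg_samples a b] := by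
        simp [mergeStepN]
      have hc := PySem.List.foldl_congr_mem (List.range (max t1.length t2.length))
        (fun (x : List (List Int)) (y : Nat) => mergeStepN (a :: t1) (b :: t2) x y.succ)
        (mergeStepN t1 t2) (acc ++ [calc_avg_samples a b])
        (fun acc' k _ => mergeStepN_cons_succ a b t1 t2 acc' k)
      rw [h0, hc, ih, alt_cons_cons]
      simp

-- ===== VERDICT (by name: the statement is the Claim_ definition above) =====
theorem wav_list_merge_for_equal_frame_rates_spec : Claim_equal_wav_list_merge_for_equal_frame_rates := by
  intro l1 l2 _
  unfold Spec_wav_list_merge_for_equal_frame_rates wav_list_merge_for_equal_frame_rates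
  rw [foldl_pyRange_eq_foldl_range, foldl_main]
  simp
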